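-- pv_equiv track=rewrite | github.com/Keiko-Evolutio/keiko-spina | services/webhooks/delivery/transform_engine.py | _apply_exclude_filter
-- ===== SOURCE A (Python) =====
-- from typing import TYPE_CHECKING, Any
--
-- def _apply_exclude_filter(
--
--     data: dict[str, Any],
--     exclude_fields: list[str],
-- ) -> dict[str, Any]:
--     """Entfernt die angegebenen Felder.
--
--     Args:
--         data: Ursprüngliche Daten
--         exclude_fields: Liste der zu entfernenden Felder
--
--     Returns:
--         Gefilterte Daten
--     """
--     exclude_set: set[str] = set(exclude_fields)
--     return {
--         key: value
--         for key, value in data.items()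
--         if key not in exclude_set
--     }
-- ===== SOURCE B (Python) =====
-- def _apply_exclude_filter(data, exclude_fields):
--     result = dict(data)
--     for field in exclude_fields:
--         result.pop(field, None)
--     return result
-- ===== Notes on version B (the rewrite author's own statement) =====
-- stated objective: idiomatic
-- what changed: B shallow-copies the dict and iterates over exclude_fields, popping each key from the copy, instead of iterating over data.items() with a set-membership filter.
import Mathlib
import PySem

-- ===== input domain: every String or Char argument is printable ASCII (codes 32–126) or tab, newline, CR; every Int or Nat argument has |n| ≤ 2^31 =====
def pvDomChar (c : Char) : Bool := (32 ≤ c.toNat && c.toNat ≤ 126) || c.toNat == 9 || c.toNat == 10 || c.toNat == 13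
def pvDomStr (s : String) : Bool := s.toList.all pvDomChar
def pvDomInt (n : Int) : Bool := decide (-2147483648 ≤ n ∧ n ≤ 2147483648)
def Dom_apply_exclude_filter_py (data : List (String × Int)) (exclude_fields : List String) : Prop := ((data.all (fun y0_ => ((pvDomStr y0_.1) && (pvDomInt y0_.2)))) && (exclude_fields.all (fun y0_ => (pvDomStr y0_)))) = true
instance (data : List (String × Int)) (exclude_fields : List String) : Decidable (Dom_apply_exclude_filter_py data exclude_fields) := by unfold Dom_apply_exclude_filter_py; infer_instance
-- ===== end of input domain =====

-- B copies the dict and pops each excluded field from the copy; A filters data.items() through a set. Same value, different decomposition.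

-- ===== PORT A =====
-- exclude_set = set(exclude_fields); {k: v for k, v in data.items() if k not in exclude_set}
def apply_exclude_filter_py (data : List (String × Int)) (exclude_fields : List String) : List (String × Int) :=
  let exclude_set : PySem.Set String := PySem.Set.ofList exclude_fields
  data.filter (fun kv => !(PySem.Set.contains exclude_set kv.1))

-- ===== PORT B =====
-- result = dict(data); for field in exclude_fields: result.pop(field, None); return result
def apply_exclude_filter_py_alt (data : List (String × Int)) (exclude_fields : List String) : List (String × Int) :=
  (exclude_fields.foldl
    (fun (result : PySem.Dict String Int) field =>
      match PySem.Dict.pop? result field with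
      | some (_, d) => d
      | none => result)
    ⟨data⟩).items

-- ===== PRECONDITION & SPEC =====
def Spec_apply_exclude_filter_py (data : List (String × Int)) (exclude_fields : List String) (out : List (String × Int)) : Prop := out = apply_exclude_filter_py_alt data exclude_fields
instance (data : List (String × Int)) (exclude_fields : List String) (out : List (String × Int)) : Decidable (Spec_apply_exclude_filter_py data exclude_fields out) := by unfold Spec_apply_exclude_filter_py; infer_instance

-- ===== CLAIM (what is proved, stated in full; the proofs are below) =====
def Claim_equal_apply_exclude_filter_py : Prop := ∀ (data : List (String × Int)) (exclude_fields : List String), Dom_apply_exclude_filter_py data exclude_fields → Spec_apply_exclude_filter_py data exclude_fields (apply_exclude_filter_py data exclude_fields)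

-- ===== LEMMAS AND PROOFS =====

-- popping `field` (with default) leaves the dict filtered of all pairs keyed `field`
theorem pop_step_eq_filter (d : PySem.Dict String Int) (field : String) :
    (match PySem.Dict.pop? d field with
     | some (_, d') => d'
     | none => d) = ⟨d.items.filter (fun p => !(p.1 == field))⟩ := by
  simp only [PySem.Dict.pop?]
  rcases h : PySem.Dict.get? d field with _ | v
  · cases d with
    | mk items =>
      simp only [Option.map_none]
      congr 1
      symm
      apply List.filter_eq_self.mpr
      intro p hp
      by_cases hk : p.1 = field
      · exact absurd (PySem.Dict.mem_keys_of_mem_items ⟨items⟩ (by simpa using hp))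
          (hk ▸ (PySem.Dict.get?_eq_none_iff_not_mem_keys ⟨items⟩ field).mp h)
      · simp [hk]
  · simp [PySem.Dict.erase]

-- folding the filter step over `ex` filters out every key in `ex`
theorem foldl_filter_step (ex : List String) (l : List (String × Int)) :
    (ex.foldl
      (fun (result : PySem.Dict String Int) field =>
        ⟨result.items.filter (fun p => !(p.1 == field))⟩)
      ⟨l⟩).items = l.filter (fun p => !(ex.contains p.1)) := by
  induction ex generalizing l with
  | nil => simp
  | cons f rest ih =>
    simp only [List.foldl_cons]
    rw [ih, List.filter_filter]
    apply List.filter_congr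
    intro p _
    simp only [List.contains_cons, Bool.not_or, Bool.and_comm]

-- folding the pop step over `ex` filters out every key in `ex`
theorem foldl_pop_eq_filter (ex : List String) (l : List (String × Int)) :
    (ex.foldl
      (fun (result : PySem.Dict String Int) field =>
        match PySem.Dict.pop? result field with
        | some (_, d) => d
        | none => result)
      ⟨l⟩).items = l.filter (fun p => !(ex.contains p.1)) := by
  simp only [pop_step_eq_filter]
  exact foldl_filter_step ex l

-- ===== VERDICT (by name: the statement is the Claim_ definition above) =====
theorem apply_exclude_filter_py_spec : Claim_equal_apply_exclude_filter_py := by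
  intro data exclude_fields _
  unfold Spec_apply_exclude_filter_py apply_exclude_filter_py apply_exclude_filter_py_alt
  rw [foldl_pop_eq_filter]
  apply List.filter_congr
  intro p _
  simp [PySem.Set.contains, PySem.Set.mem_ofList]
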